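-- pv_equiv track=rewrite | github.com/Whispergate/SysWhispers4 | core/utils.py | crc32_hash
-- ===== SOURCE A (Python) =====
-- def crc32_hash(name: str) -> int:
--     """CRC32 hash of a function name (unsigned 32-bit)."""
--     crc = 0xFFFFFFFF
--     for ch in name.encode("ascii"):
--         crc ^= ch
--         for _ in range(8):
--             if crc & 1:
--                 crc = (crc >> 1) ^ 0xEDB88320
--             else:
--                 crc >>= 1
--     return crc ^ 0xFFFFFFFF
-- ===== SOURCE B (Python) =====
-- def _make_table():
--     table = []
--     for i in range(256):
--         c = i
--         for _ in range(8):
--             c = (c >> 1) ^ 0xEDB88320 if c & 1 else c >> 1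
--         table.append(c)
--     return table
--
-- _CRC_TABLE = _make_table()
--
-- def crc32_hash(name: str) -> int:
--     """CRC32 hash of a function name (unsigned 32-bit), table-driven."""
--     crc = 0xFFFFFFFF
--     for ch in name.encode("ascii"):
--         crc = (crc >> 8) ^ _CRC_TABLE[(crc ^ ch) & 0xFF]
--     return crc ^ 0xFFFFFFFF
-- ===== Notes on version B (the rewrite author's own statement) =====
-- stated objective: faster
-- what changed: Replaces A's per-bit inner loop (8 shift/xor rounds per byte) with the classic precomputed 256-entry table lookup, one shift+xor per byte.
import Mathlib
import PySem

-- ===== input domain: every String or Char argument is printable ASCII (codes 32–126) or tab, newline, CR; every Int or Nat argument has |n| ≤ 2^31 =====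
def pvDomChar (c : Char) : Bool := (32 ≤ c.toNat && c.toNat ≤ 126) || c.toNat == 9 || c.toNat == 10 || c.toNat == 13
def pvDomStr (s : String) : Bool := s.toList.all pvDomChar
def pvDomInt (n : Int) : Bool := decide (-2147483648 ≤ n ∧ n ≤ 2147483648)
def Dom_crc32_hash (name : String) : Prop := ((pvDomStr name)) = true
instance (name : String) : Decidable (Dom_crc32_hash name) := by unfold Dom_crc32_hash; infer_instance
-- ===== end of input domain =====

-- B replaces A's 8-round per-byte bit loop with a precomputed 256-entry table, one shift+xor per byte.
-- On Dom (ASCII input) `name.encode("ascii")` never raises and yields the char codes, so both ports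
-- read the bytes as `name.toList.map Char.toNat`.

-- ===== PORT A =====
def crc32_hash (name : String) : Int :=
  let crc : Nat :=
    (name.toList.map Char.toNat).foldl (fun crc ch =>
      let crc := crc ^^^ ch
      (List.range 8).foldl (fun crc _ =>
        if crc &&& 1 = 1 then (crc >>> 1) ^^^ 0xEDB88320 else crc >>> 1) crc)
      0xFFFFFFFF
  Int.ofNat (crc ^^^ 0xFFFFFFFF)

-- ===== PORT B =====
-- table builder: for each i in range(256), 8 bit rounds, append to the table
def pvCrcTable : List Nat :=
  (List.range 256).foldl (fun table i =>
    let c := (List.range 8).foldl (fun c _ =>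
      if c &&& 1 = 1 then (c >>> 1) ^^^ 0xEDB88320 else c >>> 1) i
    table ++ [c]) []

def crc32_hash_alt (name : String) : Int :=
  let crc : Nat :=
    (name.toList.map Char.toNat).foldl (fun crc ch =>
      -- _CRC_TABLE[(crc ^ ch) & 0xFF]: index is < 256, always in range
      (crc >>> 8) ^^^ pvCrcTable.getD ((crc ^^^ ch) &&& 255) 0)
      0xFFFFFFFF
  Int.ofNat (crc ^^^ 0xFFFFFFFF)

-- ===== PRECONDITION & SPEC =====
def Spec_crc32_hash (name : String) (out : Int) : Prop := out = crc32_hash_alt name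
instance (name : String) (out : Int) : Decidable (Spec_crc32_hash name out) := by unfold Spec_crc32_hash; infer_instance

-- ===== CLAIM (what is proved, stated in full; the proofs are below) =====
def Claim_equal_crc32_hash : Prop := ∀ (name : String), Dom_crc32_hash name → Spec_crc32_hash name (crc32_hash name)

-- ===== LEMMAS AND PROOFS =====

-- one CRC bit round
def pvStep (c : Nat) : Nat := if c &&& 1 = 1 then (c >>> 1) ^^^ 0xEDB88320 else c >>> 1

-- eight rounds
def pvStep8 (c : Nat) : Nat := pvStep (pvStep (pvStep (pvStep (pvStep (pvStep (pvStep (pvStep c)))))))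

theorem foldl_range8_step (c : Nat) :
    (List.range 8).foldl (fun crc _ =>
      if crc &&& 1 = 1 then (crc >>> 1) ^^^ 0xEDB88320 else crc >>> 1) c = pvStep8 c := by
  simp [List.range_succ, pvStep8, pvStep]

-- pvStep is GF(2)-linear
theorem step_linear (a b : Nat) : pvStep (a ^^^ b) = pvStep a ^^^ pvStep b := by
  unfold pvStep
  have hx : (a ^^^ b) &&& 1 = (a &&& 1) ^^^ (b &&& 1) := Nat.and_xor_distrib_right
  have ha : a &&& 1 = 0 ∨ a &&& 1 = 1 := by rw [Nat.and_one_is_mod]; omega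
  have hb : b &&& 1 = 0 ∨ b &&& 1 = 1 := by rw [Nat.and_one_is_mod]; omega
  rw [Nat.shiftRight_xor_distrib]
  rcases ha with ha | ha <;> rcases hb with hb | hb <;>
    rw [ha, hb] at hx <;>
    simp [hx, ha, hb, Nat.xor_assoc, Nat.xor_comm, Nat.xor_left_comm, Nat.xor_self]

theorem step8_linear (a b : Nat) : pvStep8 (a ^^^ b) = pvStep8 a ^^^ pvStep8 b := by
  simp [pvStep8, step_linear]

theorem step_shiftLeft (h k : Nat) : pvStep (h <<< (k + 1)) = h <<< k := by
  unfold pvStep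
  have h1 : (h <<< (k + 1)) &&& 1 = 0 := by
    rw [Nat.and_one_is_mod, Nat.shiftLeft_eq, pow_succ, ← Nat.mul_assoc]
    exact Nat.mul_mod_left _ 2
  rw [h1]
  norm_num
  rw [Nat.shiftLeft_eq, Nat.shiftLeft_eq, Nat.shiftRight_eq_div_pow, pow_succ, ← Nat.mul_assoc,
    pow_one]
  omega

theorem step8_shiftLeft8 (h : Nat) : pvStep8 (h <<< 8) = h := by
  have s7 : pvStep (h <<< 8) = h <<< 7 := step_shiftLeft h 7
  have s6 : pvStep (h <<< 7) = h <<< 6 := step_shiftLeft h 6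
  have s5 : pvStep (h <<< 6) = h <<< 5 := step_shiftLeft h 5
  have s4 : pvStep (h <<< 5) = h <<< 4 := step_shiftLeft h 4
  have s3 : pvStep (h <<< 4) = h <<< 3 := step_shiftLeft h 3
  have s2 : pvStep (h <<< 3) = h <<< 2 := step_shiftLeft h 2
  have s1 : pvStep (h <<< 2) = h <<< 1 := step_shiftLeft h 1
  have s0 : pvStep (h <<< 1) = h <<< 0 := step_shiftLeft h 0
  simp [pvStep8, s7, s6, s5, s4, s3, s2, s1, s0]

-- a natural number is the xor of its high part (shifted back) and its low 8 bits
theorem xor_decomp (x : Nat) : ((x >>> 8) <<< 8) ^^^ (x &&& 255) = x := by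
  apply Nat.eq_of_testBit_eq
  intro i
  have h255 : (255 : Nat) = 2 ^ 8 - 1 := by norm_num
  simp only [Nat.testBit_xor, Nat.testBit_shiftLeft, Nat.testBit_shiftRight, Nat.testBit_and,
    h255, Nat.testBit_two_pow_sub_one]
  by_cases hi : i < 8
  · simp [hi, Nat.not_le.mpr hi]
  · simp [hi, Nat.le_of_not_lt hi, Nat.add_sub_cancel' (Nat.le_of_not_lt hi)]

theorem foldl_append_map {α β : Type} (f : α → β) :
    ∀ (l : List α) (acc : List β), l.foldl (fun t i => t ++ [f i]) acc = acc ++ l.map f := by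
  intro l
  induction l with
  | nil => simp
  | cons a l ih => intro acc; simp [ih]

theorem table_eq : pvCrcTable = (List.range 256).map pvStep8 := by
  unfold pvCrcTable
  simp only [foldl_range8_step]
  rw [foldl_append_map pvStep8]
  simp

theorem table_getD (b : Nat) (hb : b < 256) : pvCrcTable.getD b 0 = pvStep8 b := by
  rw [table_eq]
  simp [List.getD, hb]

-- the key per-byte identity: one table step does eight bit rounds
theorem key_lemma (crc ch : Nat) (hch : ch < 256) :
    pvStep8 (crc ^^^ ch) = (crc >>> 8) ^^^ pvCrcTable.getD ((crc ^^^ ch) &&& 255) 0 := by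
  have hidx : (crc ^^^ ch) &&& 255 < 256 := by
    have h := Nat.and_le_right (n := crc ^^^ ch) (m := 255)
    omega
  rw [table_getD _ hidx]
  have hch8 : ch >>> 8 = 0 := by
    rw [Nat.shiftRight_eq_div_pow]
    norm_num
    omega
  calc pvStep8 (crc ^^^ ch)
      = pvStep8 ((((crc ^^^ ch) >>> 8) <<< 8) ^^^ ((crc ^^^ ch) &&& 255)) := by
        rw [xor_decomp]
    _ = pvStep8 (((crc ^^^ ch) >>> 8) <<< 8) ^^^ pvStep8 ((crc ^^^ ch) &&& 255) :=
        step8_linear _ _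
    _ = ((crc ^^^ ch) >>> 8) ^^^ pvStep8 ((crc ^^^ ch) &&& 255) := by rw [step8_shiftLeft8]
    _ = (crc >>> 8) ^^^ pvStep8 ((crc ^^^ ch) &&& 255) := by
        rw [Nat.shiftRight_xor_distrib, hch8, Nat.xor_zero]

theorem fold_eq (l : List Nat) (hl : ∀ ch ∈ l, ch < 256) :
    ∀ crc : Nat,
      l.foldl (fun crc ch => pvStep8 (crc ^^^ ch)) crc =
      l.foldl (fun crc ch => (crc >>> 8) ^^^ pvCrcTable.getD ((crc ^^^ ch) &&& 255) 0) crc := by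
  induction l with
  | nil => intro crc; rfl
  | cons a l ih =>
    intro crc
    simp only [List.foldl_cons]
    rw [key_lemma crc a (hl a (List.mem_cons_self))]
    exact ih (fun ch h => hl ch (List.mem_cons_of_mem a h)) _

-- ===== VERDICT (by name: the statement is the Claim_ definition above) =====
theorem crc32_hash_spec : Claim_equal_crc32_hash := by
  intro name hdom
  unfold Spec_crc32_hash crc32_hash crc32_hash_alt
  have hl : ∀ ch ∈ name.toList.map Char.toNat, ch < 256 := by
    intro ch hch
    rcases List.mem_map.mp hch with ⟨c, hc, rfl⟩
    have := List.all_eq_true.mp hdom c hc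
    simp only [pvDomChar, Bool.or_eq_true, Bool.and_eq_true, decide_eq_true_eq, beq_iff_eq]
      at this
    omega
  simp only [foldl_range8_step]
  rw [fold_eq _ hl]
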